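-- pv_equiv track=rewrite | github.com/Clonsha00/major_mobile | major/app.py | can_form_only_sequences
-- ===== SOURCE A (Python) =====
-- def can_form_only_sequences(counts):
--     available = sorted([t for t in counts if counts[t] > 0])
--     if not available: return True
--     first = available[0]
--     try:
--         num = int(first[:-1])
--         suit = first[-1]
--         t2, t3 = f"{num+1}{suit}", f"{num+2}{suit}"
--         if counts[t2] > 0 and counts[t3] > 0:
--             counts[first]-=1; counts[t2]-=1; counts[t3]-=1
--             if can_form_only_sequences(counts): return True
--             counts[first]+=1; counts[t2]+=1; counts[t3]+=1
--     except: pass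
--     return False
-- ===== SOURCE B (Python) =====
-- def _consume(c, k):
--     """Remove every remaining copy of tile k as the start of a run k,k+1,k+2,
--     decrementing the two successor tiles by that count; None = impossible."""
--     try:
--         num = int(k[:-1])
--     except ValueError:
--         return None
--     suit = k[-1]
--     t2, t3 = f"{num + 1}{suit}", f"{num + 2}{suit}"
--     n = c[k]
--     if c.get(t2, 0) < n or c.get(t3, 0) < n:
--         return None
--     c[k] -= n
--     c[t2] -= n
--     c[t3] -= n
--     return c
--
-- def can_form_only_sequences(counts):
--     # One pass over the keys sorted once: when a key k with n > 0 copies is the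
--     # smallest remaining tile, all n copies must start a run, so remove them in
--     # one batch step instead of re-sorting and recursing per tile as A does.
--     # (Return value only: A mutates `counts`, B does not.)
--     c = dict(counts)
--     for k in sorted(c):
--         if c[k] > 0:
--             c = _consume(c, k)
--             if c is None:
--                 return False
--     return True
-- ===== Notes on version B (the rewrite author's own statement) =====
-- stated objective: alternative
-- what changed: A re-sorts the whole positive-tile list and recurses once per removed triple; B sorts the keys once and, in a single pass, removes all n copies of the least remaining tile in one batch step (all of them must start a run), so each distinct key is visited exactly once. Return value only: A mutates its argument, B does not.
import Mathlib
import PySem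

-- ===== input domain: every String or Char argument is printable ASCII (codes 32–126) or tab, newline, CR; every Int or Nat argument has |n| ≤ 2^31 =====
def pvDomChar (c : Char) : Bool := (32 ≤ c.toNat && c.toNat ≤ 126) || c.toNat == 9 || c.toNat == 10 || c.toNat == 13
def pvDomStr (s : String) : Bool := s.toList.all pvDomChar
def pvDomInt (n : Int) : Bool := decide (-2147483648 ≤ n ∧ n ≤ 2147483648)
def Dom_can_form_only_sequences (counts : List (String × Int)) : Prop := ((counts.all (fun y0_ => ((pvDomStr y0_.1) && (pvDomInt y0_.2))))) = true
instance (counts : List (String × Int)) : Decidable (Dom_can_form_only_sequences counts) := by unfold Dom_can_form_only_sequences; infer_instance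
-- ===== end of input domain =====

-- B replaces A's sort-everything-and-recurse-per-triple search by ONE pass over the keys
-- sorted once, removing all n copies of the least remaining tile in a single batch
-- subtraction (alternative decomposition; return value only: Python A mutates `counts`,
-- B does not).

-- ===== PORT A =====
-- One level of Source A's recursion, with the recursive call abstracted as `recur` and the
-- local `available = sorted([t for t in counts if counts[t] > 0])` passed in (counts[t]
-- is exact as `getD t 0` because t ranges over the keys).  The backtracking restore of
-- Source A is dead code in a pure port: the function just returns the recursive result.
-- f"{num+1}{suit}" is built on the char list because Lean's String.append is
-- kernel-opaque.
def canFormStepA (recur : PySem.Dict String Int → Bool) (d : PySem.Dict String Int) :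
    List String → Bool
  | [] => true                                   -- if not available: return True
  | first :: _ =>
    match PySem.Int.ofStr? (PySem.Str.slice first none (some (-1))) with  -- num = int(first[:-1])
    | none => false                              -- except: pass; return False
    | some num =>
      match PySem.Str.pyGet? first (-1) with     -- suit = first[-1]
      | none => false                            -- unreachable: int(first[:-1]) succeeded, so first ≠ ""
      | some suit =>
        let t2 := String.ofList ((PySem.Int.toStr (num + 1)).toList ++ [suit])
        let t3 := String.ofList ((PySem.Int.toStr (num + 2)).toList ++ [suit])
        match d.get? t2 with                     -- counts[t2] (KeyError → except → False)
        | none => false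
        | some v2 =>
          if 0 < v2 then
            match d.get? t3 with                 -- counts[t3] (KeyError → except → False)
            | none => false
            | some v3 =>
              if 0 < v3 then
                recur (((d.modify first 0 (· - 1)).modify t2 0 (· - 1)).modify t3 0 (· - 1))
              else false
          else false

-- The `fuel` argument is a totality guard only: it starts above the total positive
-- count, each recursive call of Source A removes three tiles, so it never runs out on the
-- inputs the claim covers (keys Nodup).
def canFormGoA : Nat → PySem.Dict String Int → Bool
  | 0, _ => false                                -- fuel guard (never reached at the chosen fuel)
  | fuel + 1, d =>
    canFormStepA (canFormGoA fuel) d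
      (PySem.List.sorted (d.keys.filter (fun t => decide (0 < d.getD t 0))) (fun x => x) false)

def can_form_only_sequences (counts : List (String × Int)) : Bool :=
  canFormGoA ((counts.map (fun p => p.2.toNat)).sum + 1) (PySem.Dict.mk counts)

-- ===== PORT B =====
-- Source B's `_consume(c, k)`: batch-remove every copy of tile k as a run start
-- (None = "return False").  `c[k]` on a present key is exact as `getD k 0` (n = c[k] is
-- inlined: c is not mutated before the batch lines); `c.get(t, 0)` is getD; `c[t] -= n`
-- is modify (reached only with the key present).
def canFormKeyB (c : PySem.Dict String Int) (k : String) :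
    Option (PySem.Dict String Int) :=
  match PySem.Int.ofStr? (PySem.Str.slice k none (some (-1))) with  -- num = int(k[:-1])
  | none => none                                 -- except ValueError
  | some num =>
    match PySem.Str.pyGet? k (-1) with           -- suit = k[-1]
    | none => none                               -- unreachable: int(k[:-1]) succeeded, so k ≠ ""
    | some suit =>
      let t2 := String.ofList ((PySem.Int.toStr (num + 1)).toList ++ [suit])
      let t3 := String.ofList ((PySem.Int.toStr (num + 2)).toList ++ [suit])
      if c.getD t2 0 < c.getD k 0 ∨ c.getD t3 0 < c.getD k 0 then none
      else some (((c.modify k 0 (· - c.getD k 0)).modify t2 0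
        (· - c.getD k 0)).modify t3 0 (· - c.getD k 0))

-- Source B's single for-loop over the once-sorted key list, ported as structural recursion
-- on that list (no fuel needed: each iteration consumes one key).
def canFormGoB : List String → PySem.Dict String Int → Bool
  | [], _ => true
  | k :: rest, c =>
    if 0 < c.getD k 0 then
      match canFormKeyB c k with
      | none => false
      | some c' => canFormGoB rest c'
    else canFormGoB rest c                       -- drained or non-positive key: next key

def can_form_only_sequences_alt (counts : List (String × Int)) : Bool :=
  let c := PySem.Dict.mk counts
  canFormGoB (PySem.List.sorted c.keys (fun x => x) false) c

-- ===== PRECONDITION & SPEC =====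
-- `tileSaneB k` says a key is not literally the name of its own successor tile
-- (k == str(int(k[:-1])+1) + k[-1] or the +2 tile).  NO string violates it — int(str(n))
-- is n, never n-1 or n-2 — so this conjunct excludes no input; it is stated explicitly
-- only because the PySem parser/printer round-trip (ofStr? (toStr n) = some n) is not
-- available as a lemma to derive it from.
def tileSaneB (k : String) : Bool :=
  match PySem.Int.ofStr? (PySem.Str.slice k none (some (-1))), PySem.Str.pyGet? k (-1) with
  | some num, some su =>
      (k != String.ofList ((PySem.Int.toStr (num + 1)).toList ++ [su])) &&
      (k != String.ofList ((PySem.Int.toStr (num + 2)).toList ++ [su]))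
  | _, _ => true

-- Pre_ excludes association lists with duplicate keys: a Python dict cannot contain
-- them, so the List↔dict encoding is ambiguous there (Python's dict construction keeps
-- the last value of a key, the association-list model reads the first) and neither
-- port's value is the one a Python run determines.  The tileSaneB conjunct is vacuous
-- (see its comment) and excludes nothing.
def Pre_can_form_only_sequences (counts : List (String × Int)) : Prop :=
  (counts.map Prod.fst).Nodup ∧ counts.all (fun p => tileSaneB p.1) = true
instance (counts : List (String × Int)) : Decidable (Pre_can_form_only_sequences counts) := by
  unfold Pre_can_form_only_sequences; infer_instance

def pvWitness_can_form_only_sequences : (List (String × Int)) :=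
  [("1p", 1), ("2p", 1), ("3p", 1), ("9z", 0)]

def Spec_can_form_only_sequences (counts : List (String × Int)) (out : Bool) : Prop := out = can_form_only_sequences_alt counts
instance (counts : List (String × Int)) (out : Bool) : Decidable (Spec_can_form_only_sequences counts out) := by unfold Spec_can_form_only_sequences; infer_instance

-- ===== CLAIM (what is proved, stated in full; the proofs are below) =====
def Claim_equal_can_form_only_sequences : Prop := ∀ (counts : List (String × Int)), Dom_can_form_only_sequences counts → Pre_can_form_only_sequences counts → Spec_can_form_only_sequences counts (can_form_only_sequences counts)

-- ===== LEMMAS AND PROOFS =====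

-- the joint measure of both loops: total positive tile count
def tileMass (d : PySem.Dict String Int) : Nat :=
  (d.items.map (fun p => p.2.toNat)).sum

theorem contains_of_getD_pos (d : PySem.Dict String Int) (k : String)
    (h : 0 < d.getD k 0) : d.contains k = true := by
  by_cases hc : d.contains k = true
  · exact hc
  · rw [PySem.Dict.getD_of_not_contains d 0 (by simpa using hc)] at h; omega

theorem mem_keys_of_getD_pos (d : PySem.Dict String Int) (k : String)
    (h : 0 < d.getD k 0) : k ∈ d.keys :=
  (PySem.Dict.contains_iff_mem_keys d k).mp (contains_of_getD_pos d k h)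

theorem tileMass_eq_sum_keys (d : PySem.Dict String Int) (h : d.keys.Nodup) :
    tileMass d = (d.keys.map (fun j => (d.getD j 0).toNat)).sum := by
  unfold tileMass
  rw [PySem.Dict.items_eq_map_keys d h 0, List.map_map]
  rfl

theorem getD_le_zero_of_tileMass_zero (d : PySem.Dict String Int)
    (h : tileMass d = 0) (j : String) : d.getD j 0 ≤ 0 := by
  rw [PySem.Dict.getD_eq_get?_getD]
  cases hq : d.get? j with
  | none => simp
  | some v =>
    have hv : (j, v) ∈ d.items := PySem.Dict.mem_items_of_get?_eq_some d hq
    have hm : v.toNat ∈ d.items.map (fun p => p.2.toNat) := List.mem_map_of_mem hv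
    unfold tileMass at h
    have := List.sum_eq_zero_iff.mp h _ hm
    simp only [Option.getD_some]
    omega

-- one step of A: the three single decrements
def tileStep (d : PySem.Dict String Int) (k t2 t3 : String) : PySem.Dict String Int :=
  ((d.modify k 0 (· - 1)).modify t2 0 (· - 1)).modify t3 0 (· - 1)

theorem keys_tileStep (d : PySem.Dict String Int) {k t2 t3 : String}
    (hk : d.contains k = true) (h2 : d.contains t2 = true) (h3 : d.contains t3 = true) :
    (tileStep d k t2 t3).keys = d.keys := by
  unfold tileStep PySem.Dict.modify
  rw [PySem.Dict.keys_insert_of_contains _ _ (by simp [PySem.Dict.contains_insert, h3]),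
      PySem.Dict.keys_insert_of_contains _ _ (by simp [PySem.Dict.contains_insert, h2]),
      PySem.Dict.keys_insert_of_contains _ _ hk]

theorem getD_tileStep_le (d : PySem.Dict String Int) (k t2 t3 j : String) :
    (tileStep d k t2 t3).getD j 0 ≤ d.getD j 0 := by
  unfold tileStep
  simp only [PySem.Dict.getD_modify]
  split_ifs <;> subst_vars <;> omega

theorem getD_tileStep_self_le (d : PySem.Dict String Int) (k t2 t3 : String) :
    (tileStep d k t2 t3).getD k 0 ≤ d.getD k 0 - 1 := by
  unfold tileStep
  simp only [PySem.Dict.getD_modify]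
  split_ifs <;> subst_vars <;> omega

theorem tileMass_tileStep_lt (d : PySem.Dict String Int) {k t2 t3 : String}
    (hnd : d.keys.Nodup) (hk : 0 < d.getD k 0) (h2 : d.contains t2 = true)
    (h3 : d.contains t3 = true) :
    tileMass (tileStep d k t2 t3) < tileMass d := by
  have hkeys : (tileStep d k t2 t3).keys = d.keys :=
    keys_tileStep d (contains_of_getD_pos d k hk) h2 h3
  rw [tileMass_eq_sum_keys _ hnd, tileMass_eq_sum_keys _ (by rw [hkeys]; exact hnd), hkeys]
  refine List.sum_lt_sum _ _ (fun j _ => ?_) ⟨k, mem_keys_of_getD_pos d k hk, ?_⟩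
  · have := getD_tileStep_le d k t2 t3 j; omega
  · have := getD_tileStep_self_le d k t2 t3; omega

theorem canFormGoA_true_of_nonpos (fa : Nat) (d : PySem.Dict String Int) (hfa : 0 < fa)
    (h : ∀ j, d.getD j 0 ≤ 0) : canFormGoA fa d = true := by
  obtain ⟨fa', rfl⟩ : ∃ fa', fa = fa' + 1 := ⟨fa - 1, by omega⟩
  have hf : d.keys.filter (fun t => decide (0 < d.getD t 0)) = [] :=
    List.filter_eq_nil_iff.mpr (fun t _ => by have := h t; simp; omega)
  rw [canFormGoA, hf, (PySem.List.sorted_eq_nil_iff _ _ _).mpr rfl]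
  rfl

theorem canFormGoB_true_of_nonpos (ks : List String) (d : PySem.Dict String Int)
    (h : ∀ k ∈ ks, d.getD k 0 ≤ 0) : canFormGoB ks d = true := by
  induction ks with
  | nil => rfl
  | cons k rest ih =>
    rw [canFormGoB, if_neg (by have := h k (by simp); omega)]
    exact ih (fun j hj => h j (by simp [hj]))

-- decimal printing is injective (used for the three-tiles-are-distinct facts)
theorem toDigits_ten_inj : ∀ (m : Nat), ∀ (n : Nat),
    Nat.toDigits 10 m = Nat.toDigits 10 n → m = n := by
  intro m
  induction m using Nat.strong_induction_on with
  | _ m ih =>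
    intro n h
    have hchar : ∀ a b : Nat, a < 10 → b < 10 → a.digitChar = b.digitChar → a = b := by
      intro a b ha hb hab
      interval_cases a <;> interval_cases b <;>
        first
        | rfl
        | exact absurd hab (by decide)
    rw [Nat.toDigits_eq_if (b := 10) (n := m) (by norm_num),
        Nat.toDigits_eq_if (b := 10) (n := n) (by norm_num)] at h
    by_cases hm : m < 10 <;> by_cases hn : n < 10
    · rw [if_pos hm, if_pos hn] at h
      exact hchar m n hm hn (by simpa using h)
    · rw [if_pos hm, if_neg hn] at h
      have hlen := congrArg List.length h
      simp only [List.length_cons, List.length_append, List.length_nil] at hlen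
      have hp := @Nat.length_toDigits_pos 10 (n / 10)
      omega
    · rw [if_neg hm, if_pos hn] at h
      have hlen := congrArg List.length h
      simp only [List.length_cons, List.length_append, List.length_nil] at hlen
      have hp := @Nat.length_toDigits_pos 10 (m / 10)
      omega
    · rw [if_neg hm, if_neg hn] at h
      obtain ⟨hinit, hlast'⟩ := List.append_inj' h (by simp)
      have hlast : (m % 10).digitChar = (n % 10).digitChar := by simpa using hlast' 
      have hdiv : m / 10 = n / 10 := ih (m / 10) (by omega) (n / 10) hinit
      have hmod : m % 10 = n % 10 :=
        hchar _ _ (Nat.mod_lt _ (by norm_num)) (Nat.mod_lt _ (by norm_num)) hlast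
      omega

theorem toChars_inj (a b : Int) (h : PySem.Int.toChars a = PySem.Int.toChars b) : a = b := by
  unfold PySem.Int.toChars at h
  have hdig : ∀ n : Nat, ∀ c ∈ Nat.toDigits 10 n, c ≠ '-' := by
    intro n c hc he
    have := Nat.isDigit_of_mem_toDigits (b := 10) (by norm_num) (by norm_num) hc
    rw [he] at this
    exact absurd this (by decide)
  by_cases ha : a < 0 <;> by_cases hb : b < 0
  · rw [if_pos ha, if_pos hb] at h
    have := toDigits_ten_inj _ _ (by simpa using h)
    omega
  · rw [if_pos ha, if_neg hb] at h
    exact absurd rfl (hdig b.toNat '-' (h ▸ List.mem_cons_self))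
  · rw [if_neg ha, if_pos hb] at h
    exact absurd rfl (hdig a.toNat '-' (h.symm ▸ List.mem_cons_self))
  · rw [if_neg ha, if_neg hb] at h
    have := toDigits_ten_inj _ _ h
    omega

theorem tile_succ_ne (num : Int) (suit : Char) :
    String.ofList ((PySem.Int.toStr (num + 1)).toList ++ [suit]) ≠
      String.ofList ((PySem.Int.toStr (num + 2)).toList ++ [suit]) := by
  intro h
  have h1 := congrArg String.toList h
  rw [String.toList_ofList, String.toList_ofList, PySem.Int.toList_toStr,
      PySem.Int.toList_toStr] at h1
  have := toChars_inj _ _ (List.append_cancel_right h1)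
  omega

theorem tileSaneB_spec {k : String} {num : Int} {suit : Char}
    (hs : tileSaneB k = true)
    (hnum : PySem.Int.ofStr? (PySem.Str.slice k none (some (-1))) = some num)
    (hsuit : PySem.Str.pyGet? k (-1) = some suit) :
    k ≠ String.ofList ((PySem.Int.toStr (num + 1)).toList ++ [suit]) ∧
      k ≠ String.ofList ((PySem.Int.toStr (num + 2)).toList ++ [suit]) := by
  unfold tileSaneB at hs
  rw [hnum, hsuit] at hs
  simpa using hs

-- the two ways canFormKeyB resolves, as rewrite rules
theorem canFormKeyB_none_num (c : PySem.Dict String Int) (k : String)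
    (hnum : PySem.Int.ofStr? (PySem.Str.slice k none (some (-1))) = none) :
    canFormKeyB c k = none := by
  unfold canFormKeyB; rw [hnum]

theorem canFormKeyB_none_suit (c : PySem.Dict String Int) (k : String) (num : Int)
    (hnum : PySem.Int.ofStr? (PySem.Str.slice k none (some (-1))) = some num)
    (hsuit : PySem.Str.pyGet? k (-1) = none) :
    canFormKeyB c k = none := by
  unfold canFormKeyB; rw [hnum, hsuit]

theorem canFormKeyB_eq (c : PySem.Dict String Int) (k : String) (num : Int) (suit : Char)
    (hnum : PySem.Int.ofStr? (PySem.Str.slice k none (some (-1))) = some num)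
    (hsuit : PySem.Str.pyGet? k (-1) = some suit) :
    canFormKeyB c k =
      if c.getD (String.ofList ((PySem.Int.toStr (num + 1)).toList ++ [suit])) 0 < c.getD k 0 ∨
          c.getD (String.ofList ((PySem.Int.toStr (num + 2)).toList ++ [suit])) 0 < c.getD k 0
        then none
        else some (((c.modify k 0 (· - c.getD k 0)).modify
          (String.ofList ((PySem.Int.toStr (num + 1)).toList ++ [suit])) 0
          (· - c.getD k 0)).modify
          (String.ofList ((PySem.Int.toStr (num + 2)).toList ++ [suit])) 0
          (· - c.getD k 0)) := by
  unfold canFormKeyB; rw [hnum, hsuit]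

-- one pointwise lookup after a three-key batch subtraction (A's step is the a = 1 case)
theorem getD_batch (d : PySem.Dict String Int) (k t2 t3 s : String) (a : Int)
    (hk2 : k ≠ t2) (hk3 : k ≠ t3) (h23 : t2 ≠ t3) :
    (((d.modify k 0 (· - a)).modify t2 0 (· - a)).modify t3 0 (· - a)).getD s 0 =
      if s = t3 then d.getD t3 0 - a
      else if s = t2 then d.getD t2 0 - a
      else if s = k then d.getD k 0 - a
      else d.getD s 0 := by
  simp only [PySem.Dict.getD_modify]
  split_ifs <;> subst_vars <;> simp_all

theorem tileStep_eq_batch (d : PySem.Dict String Int) (k t2 t3 : String) :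
    tileStep d k t2 t3 =
      ((d.modify k 0 (· - 1)).modify t2 0 (· - 1)).modify t3 0 (· - 1) := rfl

-- B's loop only reads the counts through getD, so it is invariant under pointwise-equal dicts
theorem canFormGoB_congr : ∀ (ks : List String) (d d' : PySem.Dict String Int),
    (∀ s, d.getD s 0 = d'.getD s 0) → canFormGoB ks d = canFormGoB ks d' := by
  intro ks
  induction ks with
  | nil => intro d d' _; rfl
  | cons k rest ih =>
    intro d d' h
    rw [canFormGoB, canFormGoB, h k]
    by_cases hk : 0 < d'.getD k 0
    · rw [if_pos hk, if_pos hk]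
      cases hnum : PySem.Int.ofStr? (PySem.Str.slice k none (some (-1))) with
      | none => rw [canFormKeyB_none_num d k hnum, canFormKeyB_none_num d' k hnum]
      | some num =>
        cases hsuit : PySem.Str.pyGet? k (-1) with
        | none =>
          rw [canFormKeyB_none_suit d k num hnum hsuit,
              canFormKeyB_none_suit d' k num hnum hsuit]
        | some suit =>
          rw [canFormKeyB_eq d k num suit hnum hsuit, canFormKeyB_eq d' k num suit hnum hsuit]
          simp only [h _]
          split_ifs with hc
          · rfl
          · exact ih _ _ (fun s => by
              simp only [PySem.Dict.getD_modify, h _])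
    · rw [if_neg hk, if_neg hk]
      exact ih d d' h

-- removing ONE copy of the least tile and its two successors does not change what B
-- computes from the same key list (B removes all copies in one batch)
theorem stepB_dec (rest : List String) (d : PySem.Dict String Int) (k : String)
    (num : Int) (suit : Char)
    (hnum : PySem.Int.ofStr? (PySem.Str.slice k none (some (-1))) = some num)
    (hsuit : PySem.Str.pyGet? k (-1) = some suit)
    (hk2 : k ≠ String.ofList ((PySem.Int.toStr (num + 1)).toList ++ [suit]))
    (hk3 : k ≠ String.ofList ((PySem.Int.toStr (num + 2)).toList ++ [suit]))
    (hn : 0 < d.getD k 0)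
    (h2 : 0 < d.getD (String.ofList ((PySem.Int.toStr (num + 1)).toList ++ [suit])) 0)
    (h3 : 0 < d.getD (String.ofList ((PySem.Int.toStr (num + 2)).toList ++ [suit])) 0) :
    canFormGoB (k :: rest)
        (tileStep d k (String.ofList ((PySem.Int.toStr (num + 1)).toList ++ [suit]))
          (String.ofList ((PySem.Int.toStr (num + 2)).toList ++ [suit]))) =
      canFormGoB (k :: rest) d := by
  have h23 := tile_succ_ne num suit
  have hg1 : (tileStep d k (String.ofList ((PySem.Int.toStr (num + 1)).toList ++ [suit]))
      (String.ofList ((PySem.Int.toStr (num + 2)).toList ++ [suit]))).getD k 0 =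
      d.getD k 0 - 1 := by
    rw [tileStep_eq_batch, getD_batch d _ _ _ k 1 hk2 hk3 h23, if_neg hk3, if_neg hk2, if_pos rfl]
  have hg2 : (tileStep d k (String.ofList ((PySem.Int.toStr (num + 1)).toList ++ [suit]))
      (String.ofList ((PySem.Int.toStr (num + 2)).toList ++ [suit]))).getD
        (String.ofList ((PySem.Int.toStr (num + 1)).toList ++ [suit])) 0 =
      d.getD (String.ofList ((PySem.Int.toStr (num + 1)).toList ++ [suit])) 0 - 1 := by
    rw [tileStep_eq_batch, getD_batch d _ _ _ _ 1 hk2 hk3 h23, if_neg h23, if_pos rfl]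
  have hg3 : (tileStep d k (String.ofList ((PySem.Int.toStr (num + 1)).toList ++ [suit]))
      (String.ofList ((PySem.Int.toStr (num + 2)).toList ++ [suit]))).getD
        (String.ofList ((PySem.Int.toStr (num + 2)).toList ++ [suit])) 0 =
      d.getD (String.ofList ((PySem.Int.toStr (num + 2)).toList ++ [suit])) 0 - 1 := by
    rw [tileStep_eq_batch, getD_batch d _ _ _ _ 1 hk2 hk3 h23, if_pos rfl]
  rw [canFormGoB, canFormGoB, hg1,
      canFormKeyB_eq _ k num suit hnum hsuit, canFormKeyB_eq d k num suit hnum hsuit,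
      hg1, hg2, hg3]
  by_cases h1 : 0 < d.getD k 0 - 1
  · rw [if_pos h1, if_pos hn]
    by_cases hc : d.getD (String.ofList ((PySem.Int.toStr (num + 1)).toList ++ [suit])) 0 <
        d.getD k 0 ∨
        d.getD (String.ofList ((PySem.Int.toStr (num + 2)).toList ++ [suit])) 0 < d.getD k 0
    · rw [if_pos (by omega), if_pos hc]
    · rw [if_neg (by omega), if_neg hc]
      refine canFormGoB_congr rest _ _ (fun s => ?_)
      have hbL := getD_batch (tileStep d k (String.ofList ((PySem.Int.toStr (num + 1)).toList ++ [suit])) (String.ofList ((PySem.Int.toStr (num + 2)).toList ++ [suit]))) k (String.ofList ((PySem.Int.toStr (num + 1)).toList ++ [suit])) (String.ofList ((PySem.Int.toStr (num + 2)).toList ++ [suit])) s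
        (d.getD k 0 - 1) hk2 hk3 h23
      have hbR := getD_batch d k (String.ofList ((PySem.Int.toStr (num + 1)).toList ++ [suit])) (String.ofList ((PySem.Int.toStr (num + 2)).toList ++ [suit])) s (d.getD k 0) hk2 hk3 h23
      have hbT := getD_batch d k (String.ofList ((PySem.Int.toStr (num + 1)).toList ++ [suit])) (String.ofList ((PySem.Int.toStr (num + 2)).toList ++ [suit])) s 1 hk2 hk3 h23
      rw [hbL, hbR, hg1, hg2, hg3, tileStep_eq_batch, hbT]
      split_ifs <;> omega
  · -- the key is drained after this single decrement: its count was exactly 1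
    rw [if_neg h1, if_pos hn]
    rw [if_neg (by omega)]
    refine canFormGoB_congr rest _ _ (fun s => ?_)
    have hbL := getD_batch d k (String.ofList ((PySem.Int.toStr (num + 1)).toList ++ [suit])) (String.ofList ((PySem.Int.toStr (num + 2)).toList ++ [suit])) s 1 hk2 hk3 h23
    have hbR := getD_batch d k (String.ofList ((PySem.Int.toStr (num + 1)).toList ++ [suit])) (String.ofList ((PySem.Int.toStr (num + 2)).toList ++ [suit])) s (d.getD k 0) hk2 hk3 h23
    rw [tileStep_eq_batch, hbL, hbR]
    split_ifs <;> omega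

theorem canForm_main : ∀ (N : Nat) (d : PySem.Dict String Int) (fa : Nat) (ks : List String),
    tileMass d ≤ N → tileMass d < fa → d.keys.Nodup →
    (∀ j ∈ d.keys, tileSaneB j = true) →
    ks.Pairwise (· < ·) → (∀ j, 0 < d.getD j 0 → j ∈ ks) →
    canFormGoA fa d = canFormGoB ks d := by
  intro N
  induction N with
  | zero =>
    intro d fa ks h0 hfa hnd hsane hsort hpos
    have hall := getD_le_zero_of_tileMass_zero d (Nat.le_zero.mp h0)
    rw [canFormGoA_true_of_nonpos fa d (by omega) hall,
        canFormGoB_true_of_nonpos ks d (fun j _ => hall j)]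
  | succ n ih =>
    intro d fa ks h0 hfa hnd hsane hsort hpos
    induction ks with
    | nil =>
      have hall : ∀ j, d.getD j 0 ≤ 0 := by
        intro j; by_contra hj
        exact absurd (hpos j (by omega)) (List.not_mem_nil)
      rw [canFormGoA_true_of_nonpos fa d (by omega) hall,
          canFormGoB_true_of_nonpos [] d (fun j hj => hall j)]
    | cons k rest ihks =>
      by_cases hk : 0 < d.getD k 0
      · -- k is the least positive tile: A picks it as `first`, B batch-drains it
        have hkf : k ∈ d.keys.filter (fun t => decide (0 < d.getD t 0)) :=
          List.mem_filter.mpr ⟨mem_keys_of_getD_pos d k hk, by simpa using hk⟩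
        obtain ⟨m, tl, hs⟩ : ∃ m tl,
            PySem.List.sorted (d.keys.filter (fun t => decide (0 < d.getD t 0)))
              (fun x => x) false = m :: tl := by
          cases hs : PySem.List.sorted (d.keys.filter (fun t => decide (0 < d.getD t 0)))
              (fun x => x) false with
          | nil =>
            exact absurd ((PySem.List.sorted_eq_nil_iff _ _ _).mp hs ▸ hkf) (List.not_mem_nil)
          | cons m tl => exact ⟨m, tl, rfl⟩
        have hm : m = k := by
          have hmmem : m ∈ d.keys.filter (fun t => decide (0 < d.getD t 0)) :=
            (PySem.List.mem_sorted _ _ _ m).mp (hs ▸ List.mem_cons_self)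
          have hmpos : 0 < d.getD m 0 := by simpa using (List.mem_filter.mp hmmem).2
          have hmk : m ≤ k := PySem.List.key_head_sorted_le _ _ hs k hkf
          rcases List.mem_cons.mp (hpos m hmpos) with h | h
          · exact h
          · exact absurd hmk (not_le.mpr ((List.pairwise_cons.mp hsort).1 m h))
        subst hm
        obtain ⟨fa', rfl⟩ : ∃ fa', fa = fa' + 1 := ⟨fa - 1, by omega⟩
        rw [canFormGoA, hs, canFormStepA, canFormGoB, if_pos hk]
        cases hnum : PySem.Int.ofStr? (PySem.Str.slice m none (some (-1))) with
        | none => rw [canFormKeyB_none_num d m hnum]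
        | some num =>
          cases hsuit : PySem.Str.pyGet? m (-1) with
          | none => rw [canFormKeyB_none_suit d m num hnum hsuit]
          | some suit =>
            rw [canFormKeyB_eq d m num suit hnum hsuit]
            simp only []
            obtain ⟨hm2, hm3⟩ :=
              tileSaneB_spec (hsane m (mem_keys_of_getD_pos d m hk)) hnum hsuit
            cases h2 : d.get? (String.ofList ((PySem.Int.toStr (num + 1)).toList ++ [suit])) with
            | none =>
              rw [if_pos (Or.inl (by
                rw [PySem.Dict.getD_eq_get?_getD, h2]; simpa using hk))]
            | some v2 =>
              simp only []
              by_cases hv2 : 0 < v2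
              · rw [if_pos hv2]
                cases h3 : d.get? (String.ofList ((PySem.Int.toStr (num + 2)).toList ++ [suit])) with
                | none =>
                  rw [if_pos (Or.inr (by
                    rw [PySem.Dict.getD_eq_get?_getD d
                      (String.ofList ((PySem.Int.toStr (num + 2)).toList ++ [suit])), h3]
                    simpa using hk))]
                | some v3 =>
                  simp only []
                  by_cases hv3 : 0 < v3
                  · rw [if_pos hv3]
                    have hc2 : d.contains
                        (String.ofList ((PySem.Int.toStr (num + 1)).toList ++ [suit])) = true := by
                      rw [PySem.Dict.contains_eq_isSome_get?, h2]; rfl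
                    have hc3 : d.contains
                        (String.ofList ((PySem.Int.toStr (num + 2)).toList ++ [suit])) = true := by
                      rw [PySem.Dict.contains_eq_isSome_get?, h3]; rfl
                    have hd2 : 0 < d.getD
                        (String.ofList ((PySem.Int.toStr (num + 1)).toList ++ [suit])) 0 := by
                      rw [PySem.Dict.getD_eq_get?_getD, h2]; simpa using hv2
                    have hd3 : 0 < d.getD
                        (String.ofList ((PySem.Int.toStr (num + 2)).toList ++ [suit])) 0 := by
                      rw [PySem.Dict.getD_eq_get?_getD, h3]; simpa using hv3
                    have hlt := tileMass_tileStep_lt d hnd hk hc2 hc3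
                    have hkeys := keys_tileStep d (contains_of_getD_pos d m hk) hc2 hc3
                    have hrec := ih
                      (tileStep d m (String.ofList ((PySem.Int.toStr (num + 1)).toList ++ [suit]))
                        (String.ofList ((PySem.Int.toStr (num + 2)).toList ++ [suit])))
                      fa' (m :: rest)
                      (by omega) (by omega)
                      (by rw [hkeys]; exact hnd)
                      (by rw [hkeys]; exact hsane)
                      hsort
                      (fun j hj => hpos j (by
                        have := getD_tileStep_le d m
                          (String.ofList ((PySem.Int.toStr (num + 1)).toList ++ [suit]))
                          (String.ofList ((PySem.Int.toStr (num + 2)).toList ++ [suit])) j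
                        omega))
                    rw [show (((d.modify m 0 (· - 1)).modify
                        (String.ofList ((PySem.Int.toStr (num + 1)).toList ++ [suit])) 0
                        (· - 1)).modify
                        (String.ofList ((PySem.Int.toStr (num + 2)).toList ++ [suit])) 0
                        (· - 1)) = tileStep d m
                        (String.ofList ((PySem.Int.toStr (num + 1)).toList ++ [suit]))
                        (String.ofList ((PySem.Int.toStr (num + 2)).toList ++ [suit])) from rfl,
                      hrec, stepB_dec rest d m num suit hnum hsuit hm2 hm3 hk hd2 hd3]
                    rw [canFormGoB, if_pos hk, canFormKeyB_eq d m num suit hnum hsuit]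
                  · rw [if_neg hv3, if_pos (Or.inr (by
                      rw [PySem.Dict.getD_eq_get?_getD d
                        (String.ofList ((PySem.Int.toStr (num + 2)).toList ++ [suit])), h3]
                      simp only [Option.getD_some]; omega))]
              · rw [if_neg hv2, if_pos (Or.inl (by
                  rw [PySem.Dict.getD_eq_get?_getD d
                    (String.ofList ((PySem.Int.toStr (num + 1)).toList ++ [suit])), h2]
                  simp only [Option.getD_some]; omega))]
      · rw [canFormGoB, if_neg hk]
        exact ihks ((List.pairwise_cons.mp hsort).2)
          (fun j hj => (List.mem_cons.mp (hpos j hj)).resolve_left (fun he => hk (he ▸ hj)))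

-- ===== VERDICT (by name: the statement is the Claim_ definition above) =====
theorem can_form_only_sequences_spec : Claim_equal_can_form_only_sequences := by
  intro counts _ hpre
  obtain ⟨hnodup, hsaneAll⟩ := hpre
  unfold Spec_can_form_only_sequences
  unfold can_form_only_sequences can_form_only_sequences_alt
  have hkeys : (PySem.Dict.mk counts).keys = counts.map Prod.fst := rfl
  have hnd : (PySem.Dict.mk counts).keys.Nodup := by rw [hkeys]; exact hnodup
  have hperm := PySem.List.sorted_perm (PySem.Dict.mk counts).keys (fun x : String => x) false
  refine canForm_main (tileMass (PySem.Dict.mk counts)) _ _ _ le_rfl ?_ hnd ?_ ?_ ?_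
  · have hm : tileMass (PySem.Dict.mk counts) = (counts.map (fun p => p.2.toNat)).sum := rfl
    omega
  · intro j hj
    rw [hkeys] at hj
    obtain ⟨p, hp, rfl⟩ := List.mem_map.mp hj
    exact List.all_eq_true.mp hsaneAll p hp
  · have hle := PySem.List.sorted_pairwise (PySem.Dict.mk counts).keys (fun x : String => x)
    have hnd' : (PySem.List.sorted (PySem.Dict.mk counts).keys (fun x : String => x) false).Nodup :=
      hperm.nodup_iff.mpr hnd
    exact (hle.and hnd').imp (fun h => lt_of_le_of_ne h.1 h.2)
  · intro j hj
    rw [PySem.List.mem_sorted]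
    exact mem_keys_of_getD_pos _ j hj
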